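-- pv_equiv track=rewrite | github.com/woodywarhol9/async-python | 1-파이썬-코루틴과-비동기-함수/01-1-cpu-bound.py | cpu_bound_func
-- ===== SOURCE A (Python) =====
-- def cpu_bound_func(number: int):
--     total = 1
--     arange = range(1, number + 1)
--     for i in arange:
--         for j in arange:
--             for k in arange:
--                 total += i * j * k
--
--     return total
-- ===== SOURCE B (Python) =====
-- def cpu_bound_func(number: int):
--     # closed form: 1 + (sum_{i=1}^{n} i)^3, since sum i*j*k factors as (sum i)^3
--     m = number if number > 0 else 0
--     s = m * (m + 1) // 2
--     return 1 + s * s * s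
-- ===== Notes on version B (the rewrite author's own statement) =====
-- stated objective: faster
-- what changed: Replaces the triple nested loop summing i*j*k by the closed form 1 + (n(n+1)/2)^3, since the triple sum factors as the cube of the single sum.
import Mathlib
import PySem

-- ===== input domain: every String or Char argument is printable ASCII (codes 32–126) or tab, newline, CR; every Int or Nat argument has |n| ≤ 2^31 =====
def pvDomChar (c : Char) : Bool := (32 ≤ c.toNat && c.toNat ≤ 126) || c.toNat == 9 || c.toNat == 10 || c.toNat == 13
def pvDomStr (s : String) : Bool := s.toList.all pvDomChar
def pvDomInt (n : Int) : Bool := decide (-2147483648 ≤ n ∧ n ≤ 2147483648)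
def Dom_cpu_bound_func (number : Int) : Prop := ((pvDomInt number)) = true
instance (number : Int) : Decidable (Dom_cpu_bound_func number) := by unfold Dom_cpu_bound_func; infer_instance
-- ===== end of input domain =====

-- B replaces A's O(n^3) triple loop by the closed form 1 + (n(n+1)/2)^3 (faster, asymptotic).


-- ===== PORT A =====
def cpu_bound_func (number : Int) : Int :=
  let arange := PySem.List.pyRange 1 (number + 1) 1
  arange.foldl (fun total i =>
    arange.foldl (fun total j =>
      arange.foldl (fun total k => total + i * j * k) total) total) 1

-- ===== PORT B =====
def cpu_bound_func_alt (number : Int) : Int :=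
  let m := if number > 0 then number else 0
  let s := PySem.Int.floordiv (m * (m + 1)) 2
  1 + s * s * s

-- ===== PRECONDITION & SPEC =====
def Spec_cpu_bound_func (number : Int) (out : Int) : Prop := out = cpu_bound_func_alt number
instance (number : Int) (out : Int) : Decidable (Spec_cpu_bound_func number out) := by unfold Spec_cpu_bound_func; infer_instance

-- ===== CLAIM (what is proved, stated in full; the proofs are below) =====
def Claim_equal_cpu_bound_func : Prop := ∀ (number : Int), Dom_cpu_bound_func number → Spec_cpu_bound_func number (cpu_bound_func number)

-- ===== LEMMAS AND PROOFS =====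

-- a fold that adds c*x for each x adds c * sum
theorem foldl_add_mul (l : List Int) (c a : Int) :
    l.foldl (fun t x => t + c * x) a = a + c * l.sum := by
  rw [PySem.List.foldl_add l (fun x => c * x) a, List.sum_map_mul_left]
  simp

-- the triple loop over any list equals init + (sum)^3
theorem triple_foldl (l : List Int) :
    l.foldl (fun total i =>
      l.foldl (fun total j =>
        l.foldl (fun total k => total + i * j * k) total) total) 1
    = 1 + l.sum * l.sum * l.sum := by
  have h1 : ∀ i : Int, (fun (total j : Int) =>
      l.foldl (fun total k => total + i * j * k) total)
      = fun total j => total + (i * l.sum) * j := by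
    intro i; funext t j
    rw [foldl_add_mul l (i * j) t]; ring
  have h2 : (fun (total i : Int) =>
      l.foldl (fun total j =>
        l.foldl (fun total k => total + i * j * k) total) total)
      = fun total i => total + (l.sum * l.sum) * i := by
    funext t i
    rw [h1 i, foldl_add_mul l (i * l.sum) t]; ring
  rw [h2, foldl_add_mul l (l.sum * l.sum) 1]

-- sum of 1..m
theorem sum_pyRange_one (m : Nat) :
    2 * (PySem.List.pyRange 1 ((m : Int) + 1) 1).sum = (m : Int) * ((m : Int) + 1) := by
  induction m with
  | zero => simp [PySem.List.pyRange_one_eq_nil]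
  | succ n ih =>
    have h : PySem.List.pyRange 1 ((n : Int) + 1 + 1) 1
        = PySem.List.pyRange 1 ((n : Int) + 1) 1 ++ [(n : Int) + 1] :=
      PySem.List.pyRange_one_succ_right (by omega)
    push_cast
    rw [h, List.sum_append]
    push_cast at ih
    simp; linarith

-- ===== VERDICT (by name: the statement is the Claim_ definition above) =====
theorem cpu_bound_func_spec : Claim_equal_cpu_bound_func := by
  intro number _
  show cpu_bound_func number = cpu_bound_func_alt number
  unfold cpu_bound_func cpu_bound_func_alt
  rw [triple_foldl]
  by_cases hn : number > 0
  · simp only [hn, if_pos]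
    obtain ⟨m, hm⟩ : ∃ m : Nat, number = (m : Int) := ⟨number.toNat, by omega⟩
    subst hm
    have hs := sum_pyRange_one m
    set S := (PySem.List.pyRange 1 ((m : Int) + 1) 1).sum with hS
    have : PySem.Int.floordiv ((m : Int) * ((m : Int) + 1)) 2 = S := by
      rw [← hs, PySem.Int.floordiv_eq_ediv_of_pos (by omega)]
      omega
    rw [this]
  · have h0 : PySem.List.pyRange 1 (number + 1) 1 = [] :=
      PySem.List.pyRange_one_eq_nil (by omega)
    simp [h0, hn]
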